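-- pv_equiv track=rewrite | github.com/Guanchen123/copepodTCR | combinatorial_peptide_pooling/functions.py | binary_union
-- ===== SOURCE A (Python) =====
-- def return_address_message(code, mode):
--
--     """
--     For A-hamiltonian path search.
--     Takes an address and returns message (0/1 string).
--     Or takes a message and returns an address.
--     Used in function(binary_union).
--     """
--
--     if mode == 'a':
--         address = []
--         for i in range(len(code)):
--             if code[i] == '1':
--                 address.append(i)
--         return address
--     if mode[0] == 'm':
--         n = int(mode[1:])
--         message = ''
--         for i in range(n):
--             if i in code:
--                 message = message + '1'
--             else:
--                 message = message + '0'
--         return message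
--
-- def binary_union(bin_list):
--
--     """
--     For A-hamiltonian path search.
--     Takes list of addresses, returns list of their unions.
--     Is dependent on function(return_address_message).
--     Used in function(hamiltonian_path_A).
--     """
--
--     union_list = []
--     for i in range(len(bin_list)-1):
--
--         set1 = set(return_address_message(bin_list[i], mode = 'a'))
--         set2 = set(return_address_message(bin_list[i+1], mode = 'a'))
--         set_union = set1.union(set2)
--         union = return_address_message(set_union, mode = 'm'+str(len(bin_list[i])))
--         union_list.append(union)
--
--     return union_list
-- ===== SOURCE B (Python) =====
-- def binary_union(bin_list):
--     """Pairwise unions of consecutive binary strings, built directly character-wise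
--     (output length = len of the first string; no index-set detour)."""
--     def union_pair(a, b):
--         return ''.join('1' if a[j] == '1' or (j < len(b) and b[j] == '1') else '0'
--                        for j in range(len(a)))
--     return [union_pair(a, b) for a, b in zip(bin_list, bin_list[1:])]
-- ===== Notes on version B (the rewrite author's own statement) =====
-- stated objective: simpler
-- what changed: B drops the index-set construction (string -> set of '1'-indices -> set union -> rebuilt string) and builds each union string directly by a character-wise OR over consecutive pairs via zip.
import Mathlib
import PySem

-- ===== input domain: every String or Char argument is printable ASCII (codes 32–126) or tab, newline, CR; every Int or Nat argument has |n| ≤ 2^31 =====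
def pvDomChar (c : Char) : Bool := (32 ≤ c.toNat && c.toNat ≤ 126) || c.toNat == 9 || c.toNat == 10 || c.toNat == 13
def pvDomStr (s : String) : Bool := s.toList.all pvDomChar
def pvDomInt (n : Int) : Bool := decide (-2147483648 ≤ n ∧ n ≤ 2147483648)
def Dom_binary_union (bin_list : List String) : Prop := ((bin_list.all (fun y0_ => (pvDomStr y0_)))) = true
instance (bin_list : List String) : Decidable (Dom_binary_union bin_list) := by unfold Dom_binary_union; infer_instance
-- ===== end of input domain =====

-- B replaces A's index-set construction (string -> set of '1'-indices -> set union -> string) by a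
-- direct character-wise OR over each consecutive pair; objective: simpler, same asymptotic cost.

-- ===== PORT A =====
-- return_address_message(code, 'a'): indices of '1' characters (strings handled as List Char)
def ramA (code : List Char) : List Int :=
  (PySem.List.pyRange 0 (PySem.List.len code) 1).foldl
    (fun address i => if PySem.List.pyGetD code i ' ' == '1' then address ++ [i] else address) []

-- return_address_message(code, 'm'+str(n)): 0/1 string of length n from a set of indices
def ramM (code : PySem.Set Int) (n : Int) : List Char :=
  (PySem.List.pyRange 0 n 1).foldl
    (fun message i => if PySem.Set.contains code i then message ++ ['1'] else message ++ ['0']) []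

def binary_union (bin_list : List String) : List String :=
  (PySem.List.pyRange 0 (PySem.List.len bin_list - 1) 1).foldl
    (fun union_list i =>
      let set1 := PySem.Set.ofList (ramA (PySem.List.pyGetD bin_list i "").toList)
      let set2 := PySem.Set.ofList (ramA (PySem.List.pyGetD bin_list (i + 1) "").toList)
      let set_union := PySem.Set.union set1 set2
      let union := ramM set_union (PySem.List.len (PySem.List.pyGetD bin_list i "").toList)
      union_list ++ [String.ofList union]) []

-- ===== PORT B =====
def unionPair (a b : List Char) : List Char :=
  (List.range a.length).map (fun j =>
    if a.getD j ' ' == '1' || (decide (j < b.length) && (b.getD j ' ' == '1')) then '1' else '0')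

def binary_union_alt (bin_list : List String) : List String :=
  (bin_list.zip bin_list.tail).map (fun p => String.ofList (unionPair p.1.toList p.2.toList))

-- ===== PRECONDITION & SPEC =====
def Spec_binary_union (bin_list : List String) (out : List String) : Prop := out = binary_union_alt bin_list
instance (bin_list : List String) (out : List String) : Decidable (Spec_binary_union bin_list out) := by unfold Spec_binary_union; infer_instance

-- ===== CLAIM (what is proved, stated in full; the proofs are below) =====
def Claim_equal_binary_union : Prop := ∀ (bin_list : List String), Dom_binary_union bin_list → Spec_binary_union bin_list (binary_union bin_list)

-- ===== LEMMAS AND PROOFS =====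

-- ramA produces exactly the in-range indices whose character is '1'
theorem mem_ramA (a : List Char) (k : Nat) :
    ((k : Int) ∈ ramA a) ↔ (k < a.length ∧ a.getD k ' ' = '1') := by
  unfold ramA
  rw [PySem.List.foldl_append_if (f := fun i => i)]
  simp [List.mem_filter, PySem.List.mem_pyRange_one]

-- per-pair: A's message from the union set equals B's character-wise OR
theorem ramM_eq_unionPair (a b : List Char) :
    ramM (PySem.Set.union (PySem.Set.ofList (ramA a)) (PySem.Set.ofList (ramA b)))
        ((a.length : Int))
      = unionPair a b := by
  unfold ramM unionPair
  have step : ∀ (s : PySem.Set Int) (message : List Char) (i : Int),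
      (if PySem.Set.contains s i then message ++ ['1'] else message ++ ['0'])
        = message ++ [if PySem.Set.contains s i then '1' else '0'] := by
    intro s message i; split <;> rfl
  simp only [step]
  rw [PySem.List.foldl_append_singleton_eq_map, PySem.List.pyRange_one]
  simp only [List.map_map, Int.sub_zero, Int.toNat_natCast, List.nil_append]
  apply List.map_congr_left
  intro k hk
  rw [List.mem_range] at hk
  have hmem : ((k : Int) ∈ PySem.Set.union (PySem.Set.ofList (ramA a)) (PySem.Set.ofList (ramA b)))
      ↔ (a.getD k ' ' = '1' ∨ (k < b.length ∧ b.getD k ' ' = '1')) := by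
    rw [PySem.Set.mem_union, PySem.Set.mem_ofList, PySem.Set.mem_ofList, mem_ramA, mem_ramA]
    constructor
    · rintro (⟨_, h⟩ | h)
      · exact Or.inl h
      · exact Or.inr h
    · rintro (h | h)
      · exact Or.inl ⟨hk, h⟩
      · exact Or.inr h
  simp only [Function.comp_def, zero_add]
  have hc : PySem.Set.contains
      (PySem.Set.union (PySem.Set.ofList (ramA a)) (PySem.Set.ofList (ramA b))) (k : Int)
      = (a.getD k ' ' == '1' || (decide (k < b.length) && (b.getD k ' ' == '1'))) := by
    rw [Bool.eq_iff_iff, PySem.Set.contains_iff, hmem]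
    simp
  rw [hc]

-- the index loop over range(len(xs)-1) with xs[k], xs[k+1] is the map over adjacent pairs
theorem range_adj_eq_zip {β : Type} (g : String → String → β) :
    ∀ (xs : List String),
      (List.range (xs.length - 1)).map
          (fun k => g (xs.getD k "") (xs.getD (k + 1) "")) =
        (xs.zip xs.tail).map (fun p => g p.1 p.2) := by
  intro xs
  induction xs with
  | nil => simp
  | cons x t ih =>
    cases t with
    | nil => simp
    | cons y t2 =>
      have hl : (x :: y :: t2).length - 1 = ((y :: t2).length - 1) + 1 := by
        simp [List.length_cons]
      rw [hl, List.range_succ_eq_map, List.map_cons, List.map_map]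
      simp only [Function.comp_def, Nat.succ_eq_add_one, List.getD_cons_zero, List.getD_cons_succ,
        List.tail_cons, List.zip_cons_cons, List.map_cons]
      refine congrArg (_ :: ·) ?_
      simpa using ih

theorem binary_union_eq (bin_list : List String) :
    binary_union bin_list = binary_union_alt bin_list := by
  unfold binary_union binary_union_alt
  rw [PySem.List.foldl_append_singleton_eq_map, PySem.List.pyRange_one]
  simp only [List.map_map, PySem.List.len_eq, Int.sub_zero, List.nil_append]
  have hpt : ∀ k ∈ List.range ((bin_list.length : Int) - 1).toNat,
      ((fun i => String.ofList (ramM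
          (PySem.Set.union (PySem.Set.ofList (ramA (PySem.List.pyGetD bin_list i "").toList))
            (PySem.Set.ofList (ramA (PySem.List.pyGetD bin_list (i + 1) "").toList)))
          (((PySem.List.pyGetD bin_list i "").toList.length : Int)))) ∘ (fun k : Nat => (0 : Int) + k)) k
        = (fun k : Nat => String.ofList (unionPair (bin_list.getD k "").toList (bin_list.getD (k+1) "").toList)) k := by
    intro k hk
    simp only [Function.comp_def, zero_add]
    have h1 : PySem.List.pyGetD bin_list (k : Int) "" = bin_list.getD k "" :=
      PySem.List.pyGetD_natCast bin_list k ""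
    have h2 : PySem.List.pyGetD bin_list ((k : Int) + 1) "" = bin_list.getD (k+1) "" := by
      rw [show ((k : Int) + 1) = ((k + 1 : Nat) : Int) by push_cast; ring]
      exact PySem.List.pyGetD_natCast bin_list (k+1) ""
    rw [h1, h2, ramM_eq_unionPair]
  rw [List.map_congr_left hpt]
  have hlen : ((bin_list.length : Int) - 1).toNat = bin_list.length - 1 := by omega
  rw [hlen]
  exact range_adj_eq_zip (fun a b => String.ofList (unionPair a.toList b.toList)) bin_list

-- ===== VERDICT (by name: the statement is the Claim_ definition above) =====
theorem binary_union_spec : Claim_equal_binary_union := by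
  intro bin_list _
  unfold Spec_binary_union
  exact binary_union_eq bin_list
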